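-- pv_equiv track=rewrite | github.com/SourabhSaraswat-191939/6Companies30days | Adobe/Adobe Q15.py | latestVer
-- ===== SOURCE A (Python) =====
-- def latestVer(first,second):
--     lengthF = len(first)
--     lengthS = len(second)
--     for i in range(min(lengthF,lengthS)):
--         if first[i]>second[i]:
--             return first
--         elif first[i]<second[i]:
--             return second
--     if lengthF>lengthS:
--         return first
--     return second
-- ===== SOURCE B (Python) =====
-- def latestVer(first, second):
--     # Sort the pair (stable) and return the last element: the lexicographically
--     # greater of the two; on a tie the stable sort keeps (first, second) order,
--     # so the last element is `second`, as required.
--     smaller, larger = sorted([first, second])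
--     return larger
-- ===== Notes on version B (the rewrite author's own statement) =====
-- stated objective: alternative
-- what changed: Replaces the explicit element-by-element scan plus final length tiebreak with sorting the two-element list (stable) and returning its last element; stability makes ties return second, matching A.
import Mathlib
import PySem

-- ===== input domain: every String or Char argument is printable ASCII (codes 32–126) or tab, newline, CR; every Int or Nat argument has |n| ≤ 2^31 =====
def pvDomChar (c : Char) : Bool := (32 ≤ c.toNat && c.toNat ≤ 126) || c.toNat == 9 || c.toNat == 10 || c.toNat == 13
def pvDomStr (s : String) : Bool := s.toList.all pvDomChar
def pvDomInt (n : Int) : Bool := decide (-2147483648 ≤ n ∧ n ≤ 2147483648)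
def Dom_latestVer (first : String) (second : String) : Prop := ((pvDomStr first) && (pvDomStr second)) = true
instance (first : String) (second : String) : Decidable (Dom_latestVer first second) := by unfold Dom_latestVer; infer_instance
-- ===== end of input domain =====

-- B replaces A's explicit index loop + length tiebreak by sorting the pair (stable)
-- and returning the last element; alternative decomposition, same cost.


-- ===== PORT A =====
-- A's `for i in range(min(lengthF, lengthS))` walking first[i]/second[i] is ported as the
-- paired structural recursion over the two character lists (same comparisons, same order);
-- `true` means "return first". lengthF/lengthS are the lengths taken before the loop.
def latestVerGo (f s : List Char) (lengthF lengthS : Int) : Bool :=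
  match f, s with
  | c :: f', d :: s' =>
      if d < c then true              -- first[i] > second[i]: return first
      else if c < d then false        -- first[i] < second[i]: return second
      else latestVerGo f' s' lengthF lengthS
  | _, _ => decide (lengthF > lengthS)  -- loop finished: compare the lengths

def latestVer (first : String) (second : String) : String :=
  let lengthF := PySem.Str.len first
  let lengthS := PySem.Str.len second
  if latestVerGo first.toList second.toList lengthF lengthS then first else second

-- ===== PORT B =====
-- Source B: `smaller, larger = sorted([first, second]); return larger`. PySem.List.sorted is
-- Python's stable sort; the two-element unpacking always succeeds (sorted preserves length),
-- so the `| _ =>` arm is unreachable (its value is arbitrary).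
def latestVer_alt (first : String) (second : String) : String :=
  match PySem.List.sorted [first, second] (fun x => x) false with
  | [_, larger] => larger
  | _ => ""   -- unreachable: sorted of a 2-element list has 2 elements

-- ===== PRECONDITION & SPEC =====
def Spec_latestVer (first : String) (second : String) (out : String) : Prop := out = latestVer_alt first second
instance (first : String) (second : String) (out : String) : Decidable (Spec_latestVer first second out) := by unfold Spec_latestVer; infer_instance

-- ===== CLAIM (what is proved, stated in full; the proofs are below) =====
def Claim_equal_latestVer : Prop := ∀ (first : String) (second : String), Dom_latestVer first second → Spec_latestVer first second (latestVer first second)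

-- ===== LEMMAS AND PROOFS =====

-- A's loop decides exactly `second < first` (lexicographically on the character lists),
-- provided the carried length comparison agrees with the remaining lists' lengths.
lemma latestVerGo_eq_lt (f s : List Char) (lf ls : Int)
    (h : lf > ls ↔ (s.length : Int) < (f.length : Int)) :
    latestVerGo f s lf ls = decide (s < f) := by
  induction f generalizing s with
  | nil =>
    cases s with
    | nil => simp [latestVerGo] at h ⊢; omega
    | cons d s' =>
      simp [latestVerGo, List.not_lt_nil] at h ⊢
      omega
  | cons c f' ih =>
    cases s with
    | nil =>
      simp [latestVerGo, List.nil_lt_cons] at h ⊢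
      omega
    | cons d s' =>
      simp only [latestVerGo]
      by_cases hdc : d < c
      · simp [hdc, List.cons_lt_cons_iff]
      · by_cases hcd : c < d
        · have : ¬ (d :: s' < c :: f') := by
            rw [List.cons_lt_cons_iff]
            rintro (h1 | ⟨h1, _⟩)
            · exact absurd h1 hdc
            · exact absurd hcd (by simp [h1])
          simp [hdc, hcd, this]
        · have hcd' : c = d := le_antisymm (not_lt.mp hdc) (not_lt.mp hcd)
          have := ih s' (by simp at h ⊢; omega)
          simp [this, hcd']

-- B's sorted pair, named: sorted [a,b] is [b,a] when b < a, else [a,b] (stability on ties).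
lemma sorted_pair (a b : String) :
    PySem.List.sorted [a, b] (fun x => x) false =
      if b < a then [b, a] else [a, b] := by
  by_cases h : b < a
  · rw [if_pos h]
    exact PySem.List.sorted_eq_of_perm_of_pairwise_lt [a, b] [b, a] (fun x => x)
      (List.Perm.swap a b []) (by simpa using h)
  · rw [if_neg h]
    exact PySem.List.sorted_id_eq_of_perm_of_pairwise [a, b] [a, b]
      (List.Perm.refl _) (by simpa using le_of_not_gt h)

lemma latestVer_alt_eq (a b : String) :
    latestVer_alt a b = if b < a then a else b := by
  unfold latestVer_alt
  rw [sorted_pair]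
  by_cases h : b < a <;> simp [h]

-- ===== VERDICT (by name: the statement is the Claim_ definition above) =====
theorem latestVer_spec : Claim_equal_latestVer := by
  intro first second _
  unfold Spec_latestVer latestVer
  rw [latestVer_alt_eq]
  simp only []
  rw [latestVerGo_eq_lt _ _ _ _ (by simp [PySem.Str.len_eq])]
  by_cases h : second.toList < first.toList <;>
    simp [h, String.lt_iff_toList_lt]
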